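-- pv_equiv track=rewrite | github.com/ihuguet/adventofcode2016.py | day13.py | calc_visited_spaces_in_range
-- ===== SOURCE A (Python) =====
-- def calc_visited_spaces_in_range(pos, max_steps):
--     if max_steps == 0:
--         return 1
--
--     active_routes = [(0, pos)]
--     visited_pos = {pos: 0}
--
--     while active_routes:
--         steps, pos = active_routes.pop()
--         if steps + 1 > max_steps:
--             continue
--         for adj_pos in get_adjacent_open_spaces(pos):
--             if adj_pos not in visited_pos or visited_pos[adj_pos] > steps + 1:
--                 visited_pos[adj_pos] = steps + 1
--                 active_routes.append((steps + 1, adj_pos))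
--
--     return len(visited_pos)
--
-- def get_adjacent_open_spaces(pos):
--     adjacents = []
--     for x, y in [(pos[0]+mov[0], pos[1]+mov[1]) for mov in [(0,1), (0,-1), (1,0), (-1,0)]]:
--         if x < 0 or y < 0:
--             continue
--         num_dec = x*x + 3*x + 2*x*y + y + y*y + puzzle_input
--         ones = format(num_dec, 'b').count('1')
--         if ones % 2 == 0: # is space, not wall
--             adjacents.append((x,y))
--     return adjacents
--
-- puzzle_input = 1358
-- ===== SOURCE B (Python) =====
-- # B: breadth-first search by layers -- each cell enters the frontier once and is
-- # expanded once, instead of A's stack-based label-correcting search that re-pushes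
-- # and re-expands cells whenever a shorter path is found.
--
-- puzzle_input = 1358
--
--
-- def open_neighbors(x, y):
--     cand = [(x, y + 1), (x, y - 1), (x + 1, y), (x - 1, y)]
--     return [c for c in cand
--             if c[0] >= 0 and c[1] >= 0
--             and (c[0] * c[0] + 3 * c[0] + 2 * c[0] * c[1] + c[1] + c[1] * c[1] + puzzle_input).bit_count() % 2 == 0]
--
--
-- def calc_visited_spaces_in_range(pos, max_steps):
--     if max_steps <= 0:
--         return 1
--     visited = {pos}
--     frontier = [(pos[0], pos[1])]
--     steps = 0
--     while frontier and steps < max_steps: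
--         steps += 1
--         new_frontier = []
--         for x, y in frontier:
--             for q in open_neighbors(x, y):
--                 if q not in visited:
--                     visited.add(q)
--                     new_frontier.append(q)
--         frontier = new_frontier
--     return len(visited)
-- ===== Notes on version B (the rewrite author's own statement) =====
-- stated objective: alternative
-- what changed: Replaced A's stack-based label-correcting search (which re-pushes and re-expands a cell every time a shorter path to it is found, keeping per-cell distances in a dict) by a breadth-first search in layers with a plain visited set, so every cell is enqueued and expanded at most once; the wall test uses int.bit_count() instead of counting '1' characters in a formatted binary string.
import Mathlib
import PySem

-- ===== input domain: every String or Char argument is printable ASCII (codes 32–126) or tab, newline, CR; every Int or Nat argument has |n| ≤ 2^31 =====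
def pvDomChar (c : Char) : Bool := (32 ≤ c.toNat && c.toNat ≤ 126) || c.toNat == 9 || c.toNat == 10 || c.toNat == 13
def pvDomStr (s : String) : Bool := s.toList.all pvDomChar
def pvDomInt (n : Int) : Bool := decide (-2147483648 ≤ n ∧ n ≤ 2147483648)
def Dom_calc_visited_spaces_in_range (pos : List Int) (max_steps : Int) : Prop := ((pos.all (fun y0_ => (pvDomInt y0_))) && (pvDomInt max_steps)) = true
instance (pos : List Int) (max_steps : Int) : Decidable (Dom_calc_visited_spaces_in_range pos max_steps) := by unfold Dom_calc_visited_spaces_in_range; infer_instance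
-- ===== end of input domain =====

-- B replaces A's stack-based label-correcting search (cells re-pushed on every distance
-- improvement, per-cell distances in a dict) by a breadth-first search in layers with a
-- plain visited set, expanding every cell exactly once.  Equivalence of the RETURN value
-- is proved on Pre_ (where Python A returns; elsewhere A raises IndexError).

-- ===== PORT A =====
-- helper get_adjacent_open_spaces; pos[0]/pos[1] via pyGet? with .getD 0: under Pre_ the
-- index is in range wherever this helper is reached, so the default is never the value used.
def pvAdjA (p : List Int) : List (List Int) :=
  (([((0:Int),(1:Int)), (0,-1), (1,0), (-1,0)]).map
      (fun mov => (((PySem.List.pyGet? p 0).getD 0) + mov.1, ((PySem.List.pyGet? p 1).getD 0) + mov.2))).foldl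
    (fun adjacents xy =>
      if xy.1 < 0 ∨ xy.2 < 0 then adjacents
      else
        if PySem.Int.bitCount (xy.1*xy.1 + 3*xy.1 + 2*xy.1*xy.2 + xy.2 + xy.2*xy.2 + 1358) % 2 == 0
        then adjacents ++ [[xy.1, xy.2]] else adjacents) []

-- fuel for the while loop: an upper bound on its number of iterations (the loop
-- terminates because every push strictly lowers a distance in the dict; the bound is
-- (steps budget) × (a box certainly containing every reachable cell, plus the start))
def pvX0 (pos : List Int) : Nat := ((PySem.List.pyGet? pos 0).getD 0).natAbs
def pvY0 (pos : List Int) : Nat := ((PySem.List.pyGet? pos 1).getD 0).natAbs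
def pvN (pos : List Int) (ms : Int) : Nat :=
  (pvX0 pos + ms.toNat + 1) * (pvY0 pos + ms.toNat + 1) + 1
def pvFuelA (pos : List Int) (ms : Int) : Nat := 1 + 5 * (ms.toNat + 1) * pvN pos ms

-- body of the inner for-loop of A: relax a neighbour (push it and record the shorter distance)
def pvAStep (steps : Int) (st : List (Int × List Int) × PySem.Dict (List Int) Int)
    (adj_pos : List Int) : List (Int × List Int) × PySem.Dict (List Int) Int :=
  if st.2.contains adj_pos = false ∨ st.2.getD adj_pos 0 > steps + 1 then
    ((steps + 1, adj_pos) :: st.1, st.2.insert adj_pos (steps + 1))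
  else st

-- the while loop; stack head = top (Python appends/pops at the right end)
def pvLoopA (ms : Int) : Nat → List (Int × List Int) → PySem.Dict (List Int) Int →
    PySem.Dict (List Int) Int
  | fuel, stack, visited =>
    match stack with
    | [] => visited
    | (steps, p) :: rest =>
      match fuel with
      | 0 => visited   -- fuel exhausted; unreachable, pvFuelA bounds the iteration count
      | fuel + 1 =>
        if steps + 1 > ms then pvLoopA ms fuel rest visited
        else
          let st := (pvAdjA p).foldl (pvAStep steps) (rest, visited)
          pvLoopA ms fuel st.1 st.2

def calc_visited_spaces_in_range (pos : List Int) (max_steps : Int) : Int :=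
  if max_steps == 0 then 1
  else
    let visited := pvLoopA max_steps (pvFuelA pos max_steps)
      [((0 : Int), pos)] (PySem.Dict.empty.insert pos 0)
    (visited.size : Int)

-- ===== PORT B =====
-- helper open_neighbors
def pvAdjB (x y : Int) : List (Int × Int) :=
  ([(x, y+1), (x, y-1), (x+1, y), (x-1, y)]).filter
    (fun c => decide (0 ≤ c.1) && decide (0 ≤ c.2) &&
      (PySem.Int.bitCount (c.1*c.1 + 3*c.1 + 2*c.1*c.2 + c.2 + c.2*c.2 + 1358) % 2 == 0))

-- the while loop: recursion on the remaining step budget max_steps - steps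
-- body of the inner for-loop of B: add an unvisited neighbour to visited and the new frontier
def pvBStep (st : PySem.Set (List Int) × List (Int × Int)) (q : Int × Int) :
    PySem.Set (List Int) × List (Int × Int) :=
  if PySem.Set.contains st.1 [q.1, q.2] = false then
    (PySem.Set.add st.1 [q.1, q.2], st.2 ++ [q])
  else st

def pvLoopB : Nat → PySem.Set (List Int) → List (Int × Int) → PySem.Set (List Int)
  | budget, visited, frontier =>
    if frontier.isEmpty then visited
    else
      match budget with
      | 0 => visited
      | budget + 1 =>
        let st := frontier.foldl
          (fun st c => (pvAdjB c.1 c.2).foldl pvBStep st) (visited, ([] : List (Int × Int)))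
        pvLoopB budget st.1 st.2

def calc_visited_spaces_in_range_alt (pos : List Int) (max_steps : Int) : Int :=
  if max_steps ≤ 0 then 1
  else
    let visited := pvLoopB max_steps.toNat (PySem.Set.ofList [pos])
      [(((PySem.List.pyGet? pos 0).getD 0), ((PySem.List.pyGet? pos 1).getD 0))]
    PySem.Set.len visited

-- ===== PRECONDITION & SPEC =====
-- Pre_ excludes exactly the inputs on which Python A raises IndexError (pos shorter than
-- two with max_steps ≥ 1: pos[0] is evaluated); Python B raises there as well.
def Pre_calc_visited_spaces_in_range (pos : List Int) (max_steps : Int) : Prop :=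
  2 ≤ pos.length ∨ max_steps ≤ 0
instance (pos : List Int) (max_steps : Int) : Decidable (Pre_calc_visited_spaces_in_range pos max_steps) := by unfold Pre_calc_visited_spaces_in_range; infer_instance

def pvWitness_calc_visited_spaces_in_range : List Int × Int := ([0, 0], 2)

def Spec_calc_visited_spaces_in_range (pos : List Int) (max_steps : Int) (out : Int) : Prop := out = calc_visited_spaces_in_range_alt pos max_steps
instance (pos : List Int) (max_steps : Int) (out : Int) : Decidable (Spec_calc_visited_spaces_in_range pos max_steps out) := by unfold Spec_calc_visited_spaces_in_range; infer_instance

-- ===== CLAIM (what is proved, stated in full; the proofs are below) =====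
def Claim_equal_calc_visited_spaces_in_range : Prop := ∀ (pos : List Int) (max_steps : Int), Dom_calc_visited_spaces_in_range pos max_steps → Pre_calc_visited_spaces_in_range pos max_steps → Spec_calc_visited_spaces_in_range pos max_steps (calc_visited_spaces_in_range pos max_steps)

-- ===== LEMMAS AND PROOFS =====

def pvGx (p : List Int) : Int := (PySem.List.pyGet? p 0).getD 0
def pvGy (p : List Int) : Int := (PySem.List.pyGet? p 1).getD 0
def pvPick (x y : Int) : List (List Int) :=
  if x < 0 ∨ y < 0 then []
  else if PySem.Int.bitCount (x*x + 3*x + 2*x*y + y + y*y + 1358) % 2 == 0 then [[x, y]] else []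
def pvKeyOf (c : Int × Int) : List Int := [c.1, c.2]

lemma pvGx_pair (a b : Int) : pvGx [a, b] = a := by
  simp [pvGx, PySem.List.pyGet?, PySem.List.pyIdx?]
lemma pvGy_pair (a b : Int) : pvGy [a, b] = b := by
  simp [pvGy, PySem.List.pyGet?, PySem.List.pyIdx?]

lemma pvStepA_eq (acc : List (List Int)) (xy : Int × Int) :
    (if xy.1 < 0 ∨ xy.2 < 0 then acc
     else if PySem.Int.bitCount (xy.1*xy.1 + 3*xy.1 + 2*xy.1*xy.2 + xy.2 + xy.2*xy.2 + 1358) % 2 == 0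
       then acc ++ [[xy.1, xy.2]] else acc) = acc ++ pvPick xy.1 xy.2 := by
  unfold pvPick
  split_ifs <;> simp

lemma pvAdjA_eq (p : List Int) : pvAdjA p =
    pvPick (pvGx p) (pvGy p + 1) ++ pvPick (pvGx p) (pvGy p - 1) ++
    pvPick (pvGx p + 1) (pvGy p) ++ pvPick (pvGx p - 1) (pvGy p) := by
  show List.foldl _ [] _ = _
  rw [show ((([((0:Int),(1:Int)), (0,-1), (1,0), (-1,0)]).map
      (fun mov => (((PySem.List.pyGet? p 0).getD 0) + mov.1, ((PySem.List.pyGet? p 1).getD 0) + mov.2))) =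
      [(pvGx p, pvGy p + 1), (pvGx p, pvGy p - 1), (pvGx p + 1, pvGy p), (pvGx p - 1, pvGy p)])
    from by simp [pvGx, pvGy]; omega]
  simp only [List.foldl_cons, List.foldl_nil, pvStepA_eq]
  simp

lemma pvStepB_eq (x y : Int) :
    ((if (decide (0 ≤ x) && decide (0 ≤ y) &&
      (PySem.Int.bitCount (x*x + 3*x + 2*x*y + y + y*y + 1358) % 2 == 0)) = true
      then [(x, y)] else []).map pvKeyOf) = pvPick x y := by
  unfold pvPick
  rcases lt_or_ge x 0 with hx | hx
  · rw [if_pos (Or.inl hx)]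
    simp [show ¬ (0 ≤ x) from by omega]
  · rcases lt_or_ge y 0 with hy | hy
    · rw [if_pos (Or.inr hy)]
      simp [show ¬ (0 ≤ y) from by omega]
    · rw [if_neg (show ¬ (x < 0 ∨ y < 0) from by omega)]
      rw [show decide (0 ≤ x) = true from by simpa using hx,
          show decide (0 ≤ y) = true from by simpa using hy]
      cases he : (PySem.Int.bitCount (x*x + 3*x + 2*x*y + y + y*y + 1358) % 2 == 0) <;>
        simp [pvKeyOf]
lemma pvFilter4 {α : Type} (f : α → Bool) (a b c d : α) :
    List.filter f [a, b, c, d] =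
      (if f a = true then [a] else []) ++ (if f b = true then [b] else []) ++
      (if f c = true then [c] else []) ++ (if f d = true then [d] else []) := by
  cases hfa : f a <;> cases hfb : f b <;> cases hfc : f c <;> cases hfd : f d <;>
    simp [List.filter, hfa, hfb, hfc, hfd]

lemma pvAdjB_map (x y : Int) : (pvAdjB x y).map pvKeyOf =
    pvPick x (y + 1) ++ pvPick x (y - 1) ++ pvPick (x + 1) y ++ pvPick (x - 1) y := by
  simp only [pvAdjB, pvFilter4, List.map_append, pvStepB_eq]

lemma pvAdjA_eq_adjB (p : List Int) :
    pvAdjA p = (pvAdjB (pvGx p) (pvGy p)).map pvKeyOf := by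
  rw [pvAdjA_eq, pvAdjB_map]

lemma pvAdjA_pair (a b : Int) : pvAdjA [a, b] = (pvAdjB a b).map pvKeyOf := by
  rw [pvAdjA_eq_adjB, pvGx_pair, pvGy_pair]

lemma pvMem_pick {r : List Int} {x y : Int} (h : r ∈ pvPick x y) :
    r = [x, y] ∧ 0 ≤ x ∧ 0 ≤ y := by
  unfold pvPick at h
  split_ifs at h with h1 h2 <;> simp_all

lemma pvMem_adjA {r p : List Int} (h : r ∈ pvAdjA p) :
    ∃ a b : Int, r = [a, b] ∧ 0 ≤ a ∧ 0 ≤ b ∧ a ≤ pvGx p + 1 ∧ b ≤ pvGy p + 1 := by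
  rw [pvAdjA_eq] at h
  simp only [List.mem_append] at h
  rcases h with ((h | h) | h) | h <;>
    obtain ⟨rfl, h1, h2⟩ := pvMem_pick h <;>
    exact ⟨_, _, rfl, by omega, by omega, by omega, by omega⟩

-- the spec: ball of radius k around pos in the graph of open cells
def pvBall (pos : List Int) : Nat → List Int → Prop
  | 0, q => q = pos
  | k+1, q => pvBall pos k q ∨ ∃ p, pvBall pos k p ∧ q ∈ pvAdjA p

lemma pvBall_mono {pos : List Int} {k k' : Nat} (h : k ≤ k') {q : List Int}
    (hq : pvBall pos k q) : pvBall pos k' q := by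
  induction k' with
  | zero => simpa [Nat.le_zero.mp h] using hq
  | succ n ih =>
    rcases Nat.lt_or_ge k (n+1) with hlt | hge
    · exact Or.inl (ih (by omega))
    · have : k = n + 1 := by omega
      subst this; exact hq

lemma pvBall_stab {pos : List Int} {j : Nat}
    (h : ∀ q, pvBall pos (j+1) q → pvBall pos j q) :
    ∀ k q, pvBall pos (j+k) q → pvBall pos j q := by
  intro k
  induction k with
  | zero => intro q hq; exact hq
  | succ n ih =>
    intro q hq
    rcases hq with hq | ⟨p, hp, hadj⟩
    · exact ih q hq
    · exact h q (Or.inr ⟨p, ih p hp, hadj⟩)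
-- ===== B side =====
def pvNB (fr : List (Int × Int)) (q : List Int) : Prop :=
  ∃ c ∈ fr, q ∈ (pvAdjB c.1 c.2).map pvKeyOf

lemma pvFoldBInner (L : List (Int × Int)) :
    ∀ st : PySem.Set (List Int) × List (Int × Int),
    (∀ q, q ∈ (L.foldl pvBStep st).1 ↔ q ∈ st.1 ∨ q ∈ L.map pvKeyOf) ∧
    (∀ q, q ∈ (L.foldl pvBStep st).2.map pvKeyOf ↔
        q ∈ st.2.map pvKeyOf ∨ (q ∈ L.map pvKeyOf ∧ q ∉ st.1)) ∧
    (st.1.Nodup → (L.foldl pvBStep st).1.Nodup) := by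
  induction L with
  | nil => intro st; simp
  | cons c rest ih =>
    intro st
    simp only [List.foldl_cons, List.map_cons, List.mem_cons]
    by_cases hc : [c.1, c.2] ∈ st.1
    · have hstep : pvBStep st c = st := by
        unfold pvBStep
        rw [if_neg]
        simp [PySem.Set.contains_iff, hc]
      rw [hstep]
      obtain ⟨i1, i2, i3⟩ := ih st
      refine ⟨fun q => ?_, fun q => ?_, i3⟩
      · rw [i1]
        constructor
        · rintro (h | h)
          · exact Or.inl h
          · exact Or.inr (Or.inr h)
        · rintro (h | h | h)
          · exact Or.inl h
          · exact Or.inl (by rw [h, pvKeyOf]; exact hc)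
          · exact Or.inr h
      · rw [i2]
        constructor
        · rintro (h | ⟨h1, h2⟩)
          · exact Or.inl h
          · exact Or.inr ⟨Or.inr h1, h2⟩
        · rintro (h | ⟨h1 | h1, h2⟩)
          · exact Or.inl h
          · exact absurd (by rw [h1, pvKeyOf]; exact hc) h2
          · exact Or.inr ⟨h1, h2⟩
    · have hstep : pvBStep st c = (PySem.Set.add st.1 [c.1, c.2], st.2 ++ [c]) := by
        unfold pvBStep
        rw [if_pos]
        simp [PySem.Set.contains_iff, hc]
      rw [hstep]
      obtain ⟨i1, i2, i3⟩ := ih (PySem.Set.add st.1 [c.1, c.2], st.2 ++ [c])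
      refine ⟨fun q => ?_, fun q => ?_, fun hnd => i3 (by simpa using PySem.Set.nodup_add _ _ hnd)⟩
      · rw [i1]
        simp only [PySem.Set.mem_add, pvKeyOf]
        tauto
      · rw [i2]
        simp only [List.map_append, List.map_cons, List.map_nil, List.mem_append,
          List.mem_cons, List.not_mem_nil, or_false, PySem.Set.mem_add, pvKeyOf]
        constructor
        · rintro ((h | h) | ⟨h1, h2⟩)
          · exact Or.inl h
          · exact Or.inr ⟨Or.inl h, by rw [h]; exact hc⟩
          · exact Or.inr ⟨Or.inr h1, fun hq => h2 (Or.inl hq)⟩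
        · rintro (h | ⟨h1 | h1, h2⟩)
          · exact Or.inl (Or.inl h)
          · exact Or.inl (Or.inr h1)
          · by_cases hq : q = [c.1, c.2]
            · exact Or.inl (Or.inr hq)
            · exact Or.inr ⟨h1, by tauto⟩
lemma pvFoldBOuter (fr : List (Int × Int)) :
    ∀ st : PySem.Set (List Int) × List (Int × Int),
    (∀ q, q ∈ (fr.foldl (fun st c => (pvAdjB c.1 c.2).foldl pvBStep st) st).1 ↔
        q ∈ st.1 ∨ pvNB fr q) ∧
    (∀ q, q ∈ (fr.foldl (fun st c => (pvAdjB c.1 c.2).foldl pvBStep st) st).2.map pvKeyOf ↔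
        q ∈ st.2.map pvKeyOf ∨ (pvNB fr q ∧ q ∉ st.1)) ∧
    (st.1.Nodup → (fr.foldl (fun st c => (pvAdjB c.1 c.2).foldl pvBStep st) st).1.Nodup) := by
  induction fr with
  | nil => intro st; simp [pvNB]
  | cons c rest ih =>
    intro st
    simp only [List.foldl_cons]
    obtain ⟨m1, m2, m3⟩ := pvFoldBInner (pvAdjB c.1 c.2) st
    obtain ⟨i1, i2, i3⟩ := ih ((pvAdjB c.1 c.2).foldl pvBStep st)
    have hNB : ∀ q, pvNB (c :: rest) q ↔ q ∈ (pvAdjB c.1 c.2).map pvKeyOf ∨ pvNB rest q := by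
      intro q
      simp only [pvNB, List.mem_cons]
      constructor
      · rintro ⟨c', hc' | hc', hq⟩
        · exact Or.inl (hc' ▸ hq)
        · exact Or.inr ⟨c', hc', hq⟩
      · rintro (h | ⟨c', hc', hq⟩)
        · exact ⟨c, Or.inl rfl, h⟩
        · exact ⟨c', Or.inr hc', hq⟩
    refine ⟨fun q => ?_, fun q => ?_, fun hnd => i3 (m3 hnd)⟩
    · rw [i1, m1 q, hNB q]
      tauto
    · rw [i2, m2 q, hNB q, m1 q]
      tauto

lemma pvLoopB_zero (vis : PySem.Set (List Int)) (fr : List (Int × Int)) :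
    pvLoopB 0 vis fr = vis := by
  unfold pvLoopB
  split <;> rfl

lemma pvLoopB_spec (pos : List Int) :
    ∀ (n : Nat) (vis : PySem.Set (List Int)) (fr : List (Int × Int)) (j : Nat),
    (∀ q, q ∈ vis ↔ pvBall pos j q) →
    (∀ q, pvBall pos (j+1) q ↔ (pvBall pos j q ∨ pvNB fr q)) →
    vis.Nodup →
    (pvLoopB n vis fr).Nodup ∧ ∀ q, q ∈ pvLoopB n vis fr ↔ pvBall pos (j + n) q := by
  intro n
  induction n with
  | zero =>
    intro vis fr j h1 _ hnd
    rw [pvLoopB_zero]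
    exact ⟨hnd, fun q => by rw [Nat.add_zero]; exact h1 q⟩
  | succ n ih =>
    intro vis fr j h1 h2 hnd
    by_cases hfr : fr.isEmpty
    · have hstop : pvLoopB (n+1) vis fr = vis := by
        unfold pvLoopB
        rw [if_pos hfr]
      rw [hstop]
      have hfr' : fr = [] := List.isEmpty_iff.mp hfr
      subst hfr'
      have hstab : ∀ q, pvBall pos (j+1) q → pvBall pos j q := by
        intro q hq
        rcases (h2 q).mp hq with h | ⟨c, hc, _⟩
        · exact h
        · cases hc
      refine ⟨hnd, fun q => ⟨fun hq => pvBall_mono (by omega) ((h1 q).mp hq), fun hq => ?_⟩⟩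
      exact (h1 q).mpr (pvBall_stab hstab (n+1) q hq)
    · have hstep : pvLoopB (n+1) vis fr =
          pvLoopB n (fr.foldl (fun st c => (pvAdjB c.1 c.2).foldl pvBStep st) (vis, [])).1
            (fr.foldl (fun st c => (pvAdjB c.1 c.2).foldl pvBStep st) (vis, [])).2 := by
        conv_lhs => rw [pvLoopB]
        rw [if_neg hfr]
      rw [hstep]
      obtain ⟨o1, o2, o3⟩ := pvFoldBOuter fr (vis, [])
      set st := fr.foldl (fun st c => (pvAdjB c.1 c.2).foldl pvBStep st) (vis, []) with hst
      have hv' : ∀ q, q ∈ st.1 ↔ pvBall pos (j+1) q := by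
        intro q
        rw [o1 q, h2 q, h1 q]
      have hf' : ∀ q, pvBall pos (j+1+1) q ↔ (pvBall pos (j+1) q ∨ pvNB st.2 q) := by
        intro q
        constructor
        · rintro (h | ⟨p, hp, hadj⟩)
          · exact Or.inl h
          · by_cases hpj : pvBall pos j p
            · exact Or.inl (Or.inr ⟨p, hpj, hadj⟩)
            · have hpNB : pvNB fr p := by
                rcases (h2 p).mp hp with h' | h'
                · exact absurd h' hpj
                · exact h'
              have hpmem : p ∈ st.2.map pvKeyOf := by
                rw [o2 p]
                exact Or.inr ⟨hpNB, fun hv => hpj ((h1 p).mp hv)⟩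
              obtain ⟨c, hc, rfl⟩ := List.mem_map.mp hpmem
              exact Or.inr ⟨c, hc, by rw [← pvAdjA_pair]; exact hadj⟩
        · rintro (h | ⟨c, hc, hq⟩)
          · exact Or.inl h
          · have hcmem : pvKeyOf c ∈ st.2.map pvKeyOf := List.mem_map_of_mem hc
            have hcnew : pvNB fr (pvKeyOf c) ∧ pvKeyOf c ∉ vis := by
              rcases (o2 (pvKeyOf c)).mp hcmem with h' | h'
              · simp at h'
              · exact h'
            have hcball : pvBall pos (j+1) (pvKeyOf c) := (h2 _).mpr (Or.inr hcnew.1)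
            exact Or.inr ⟨pvKeyOf c, hcball, by rw [show pvKeyOf c = [c.1, c.2] from rfl, pvAdjA_pair]; exact hq⟩
      have := ih st.1 st.2 (j+1) hv' hf' (o3 hnd)
      refine ⟨this.1, fun q => ?_⟩
      rw [this.2 q, show j + 1 + n = j + (n + 1) from by omega]
-- ===== A side =====
lemma pvAltB_keys (pos : List Int) (ms : Int) :
    (pvLoopB ms.toNat (PySem.Set.ofList [pos]) [(pvGx pos, pvGy pos)]).Nodup ∧
    ∀ q, q ∈ pvLoopB ms.toNat (PySem.Set.ofList [pos]) [(pvGx pos, pvGy pos)] ↔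
      pvBall pos ms.toNat q := by
  have h1 : ∀ q, q ∈ PySem.Set.ofList [pos] ↔ pvBall pos 0 q := by
    intro q
    rw [PySem.Set.mem_ofList]
    simp [pvBall]
  have h2 : ∀ q, pvBall pos (0+1) q ↔ (pvBall pos 0 q ∨ pvNB [(pvGx pos, pvGy pos)] q) := by
    intro q
    show (pvBall pos 0 q ∨ ∃ p, pvBall pos 0 p ∧ q ∈ pvAdjA p) ↔ _
    have : pvNB [(pvGx pos, pvGy pos)] q ↔ q ∈ pvAdjA pos := by
      simp only [pvNB, List.mem_singleton]
      constructor
      · rintro ⟨c, rfl, hq⟩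
        rw [pvAdjA_eq_adjB]
        exact hq
      · intro hq
        exact ⟨(pvGx pos, pvGy pos), rfl, by rw [← pvAdjA_eq_adjB]; exact hq⟩
    rw [this]
    constructor
    · rintro (h | ⟨p, hp, hadj⟩)
      · exact Or.inl h
      · exact Or.inr (by rwa [show p = pos from hp] at hadj)
    · rintro (h | h)
      · exact Or.inl h
      · exact Or.inr ⟨pos, rfl, h⟩
  have := pvLoopB_spec pos ms.toNat (PySem.Set.ofList [pos]) [(pvGx pos, pvGy pos)] 0 h1 h2
    (PySem.Set.nodup_ofList [pos])
  exact ⟨this.1, fun q => by rw [this.2 q, Nat.zero_add]⟩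

def pvVal (d : PySem.Dict (List Int) Int) (q : List Int) : Int := d.getD q 0

def pvStackInv (pos : List Int) (ms : Int) (stack : List (Int × List Int)) : Prop :=
  ∀ e ∈ stack, 0 ≤ e.1 ∧ e.1 ≤ ms ∧ pvBall pos e.1.toNat e.2
def pvDictInv (pos : List Int) (ms : Int) (d : PySem.Dict (List Int) Int) : Prop :=
  ∀ kv ∈ d.items, 0 ≤ kv.2 ∧ kv.2 ≤ ms ∧ pvBall pos kv.2.toNat kv.1
def pvSettled (ms : Int) (d : PySem.Dict (List Int) Int) (q : List Int) : Prop :=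
  pvVal d q + 1 ≤ ms → ∀ r ∈ pvAdjA q, r ∈ d.keys ∧ pvVal d r ≤ pvVal d q + 1
def pvSP (ms : Int) (stack : List (Int × List Int)) (d : PySem.Dict (List Int) Int) : Prop :=
  ∀ q ∈ d.keys, (pvVal d q, q) ∈ stack ∨ pvSettled ms d q
def pvClosed (ms : Int) (d : PySem.Dict (List Int) Int) : Prop :=
  ∀ q ∈ d.keys, pvSettled ms d q
def pvPot (d : PySem.Dict (List Int) Int) : Nat := (d.items.map (fun kv => kv.2.toNat)).sum
def pvBox (pos : List Int) (ms : Int) : Finset (List Int) :=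
  insert pos (((Finset.range (pvX0 pos + ms.toNat + 1)) ×ˢ (Finset.range (pvY0 pos + ms.toNat + 1))).image
    (fun ab => [((ab.1 : Nat) : Int), ((ab.2 : Nat) : Int)]))
def pvMu (pos : List Int) (ms : Int) (stack : List (Int × List Int))
    (d : PySem.Dict (List Int) Int) : Nat :=
  stack.length + 5 * pvPot d + 5 * (ms.toNat + 1) * (pvN pos ms - d.size)

lemma pvBall_coords {pos : List Int} {k : Nat} {q : List Int} (h : pvBall pos k q) :
    q = pos ∨ ∃ a b : Nat, q = [(a : Int), (b : Int)] ∧ a ≤ pvX0 pos + k ∧ b ≤ pvY0 pos + k := by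
  induction k generalizing q with
  | zero => exact Or.inl h
  | succ n ih =>
    rcases h with h | ⟨p, hp, hadj⟩
    · rcases ih h with h' | ⟨a, b, rfl, ha, hb⟩
      · exact Or.inl h'
      · exact Or.inr ⟨a, b, rfl, by omega, by omega⟩
    · obtain ⟨a, b, rfl, ha, hb, hax, hby⟩ := pvMem_adjA hadj
      have hgx : pvGx p ≤ (pvX0 pos : Int) + n ∧ pvGy p ≤ (pvY0 pos : Int) + n := by
        rcases ih hp with rfl | ⟨a', b', rfl, ha', hb'⟩
        · constructor
          · exact le_trans (Int.le_natAbs) (by simp [pvX0, pvGx])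
          · exact le_trans (Int.le_natAbs) (by simp [pvY0, pvGy])
        · rw [pvGx_pair, pvGy_pair]
          exact ⟨by exact_mod_cast ha', by exact_mod_cast hb'⟩
      refine Or.inr ⟨a.toNat, b.toNat, by simp [ha, hb], by omega, by omega⟩

lemma pvBall_box {pos : List Int} {ms : Int} {k : Nat} {q : List Int}
    (hk : k ≤ ms.toNat) (h : pvBall pos k q) : q ∈ pvBox pos ms := by
  rcases pvBall_coords h with rfl | ⟨a, b, rfl, ha, hb⟩
  · exact Finset.mem_insert_self _ _
  · refine Finset.mem_insert_of_mem (Finset.mem_image.mpr ⟨(a, b), ?_, rfl⟩)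
    rw [Finset.mem_product]
    constructor <;> simp [Finset.mem_range] <;> omega

lemma pvBox_card (pos : List Int) (ms : Int) : (pvBox pos ms).card ≤ pvN pos ms := by
  unfold pvBox pvN
  refine le_trans (Finset.card_insert_le _ _) ?_
  have := Finset.card_image_le (s := (Finset.range (pvX0 pos + ms.toNat + 1)) ×ˢ
    (Finset.range (pvY0 pos + ms.toNat + 1)))
    (f := fun ab : Nat × Nat => [((ab.1 : Nat) : Int), ((ab.2 : Nat) : Int)])
  rw [Finset.card_product, Finset.card_range, Finset.card_range] at this
  omega

lemma pvKeys_length (d : PySem.Dict (List Int) Int) : d.keys.length = d.size := by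
  simp [PySem.Dict.keys, PySem.Dict.size]

lemma pvSize_lt {pos : List Int} {ms : Int} {d : PySem.Dict (List Int) Int} {c : List Int}
    (hnd : d.keys.Nodup) (hbox : ∀ q ∈ d.keys, q ∈ pvBox pos ms)
    (hc : c ∈ pvBox pos ms) (hnc : c ∉ d.keys) : d.size < pvN pos ms := by
  rw [← pvKeys_length, ← List.toFinset_card_of_nodup hnd]
  have hsub : insert c d.keys.toFinset ⊆ pvBox pos ms := by
    intro q hq
    rcases Finset.mem_insert.mp hq with rfl | hq
    · exact hc
    · exact hbox q (List.mem_toFinset.mp hq)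
  have := le_trans (Finset.card_le_card hsub) (pvBox_card pos ms)
  rw [Finset.card_insert_of_notMem (fun h => hnc (List.mem_toFinset.mp h))] at this
  omega
lemma pvPot_replace {q : List Int} {v w : Int} :
    ∀ (l : List (List Int × Int)), (l.map Prod.fst).Nodup → (q, w) ∈ l →
    ((l.map (fun p => if (p.1 == q) = true then (q, v) else p)).map (fun kv => kv.2.toNat)).sum
      + w.toNat = (l.map (fun kv => kv.2.toNat)).sum + v.toNat := by
  intro l
  induction l with
  | nil => intro _ h; cases h
  | cons kv l ih =>
    intro hnd hw
    simp only [List.map_cons, List.nodup_cons] at hnd ⊢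
    by_cases hk : kv.1 = q
    · have hwv : kv.2 = w := by
        rcases List.mem_cons.mp hw with h | h
        · rw [← h]
        · exact absurd (hk ▸ (List.mem_map.mpr ⟨(q, w), h, rfl⟩)) hnd.1
      have hrest : l.map (fun p => if (p.1 == q) = true then (q, v) else p) = l := by
        conv_rhs => rw [← List.map_id l]
        refine List.map_congr_left (fun p hp => ?_)
        have hne : p.1 ≠ q := fun h => hnd.1 (by rw [hk, ← h]; exact List.mem_map.mpr ⟨p, hp, rfl⟩)
        simp [hne]
      rw [if_pos (by simpa using hk), hrest]
      simp only [List.map_cons, List.sum_cons]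
      omega
    · have hw' : (q, w) ∈ l := by
        rcases List.mem_cons.mp hw with h | h
        · exact absurd (congrArg Prod.fst h.symm) hk
        · exact h
      have := ih hnd.2 hw'
      rw [if_neg (by simpa using hk)]
      simp only [List.map_cons, List.sum_cons]
      omega

lemma pvKeys_eq_map (d : PySem.Dict (List Int) Int) : d.keys = d.items.map Prod.fst := by
  simp [PySem.Dict.keys, PySem.Dict.items]

lemma pvVal_mem_items {d : PySem.Dict (List Int) Int} {q : List Int}
    (hnd : d.keys.Nodup) (hq : q ∈ d.keys) : (q, pvVal d q) ∈ d.items := by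
  rw [pvKeys_eq_map] at hq
  obtain ⟨kv, hkv, hfst⟩ := List.mem_map.mp hq
  have hval : pvVal d q = kv.2 := by
    have := PySem.Dict.getD_of_mem_items (d := d) (k := kv.1) (v := kv.2)
      (by simpa using hkv) hnd 0
    rw [pvVal, ← hfst, this]
  rw [hval, ← hfst]
  simpa using hkv

lemma pvPot_insert_new {d : PySem.Dict (List Int) Int} {q : List Int} {v : Int}
    (h : d.contains q = false) : pvPot (d.insert q v) = pvPot d + v.toNat := by
  unfold pvPot
  rw [PySem.Dict.items_insert_of_not_contains d v h]
  simp

lemma pvPot_insert_old {d : PySem.Dict (List Int) Int} {q : List Int} {v : Int}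
    (hnd : d.keys.Nodup) (h : d.contains q = true) :
    pvPot (d.insert q v) + (pvVal d q).toNat = pvPot d + v.toNat := by
  unfold pvPot
  rw [PySem.Dict.items_insert_of_contains d v h]
  exact pvPot_replace d.items (by rw [← pvKeys_eq_map]; exact hnd)
    (pvVal_mem_items hnd ((PySem.Dict.contains_iff_mem_keys d q).mp h))

structure PvFoldOut (pos : List Int) (ms s : Int) (L : List (List Int))
    (stk : List (Int × List Int)) (d : PySem.Dict (List Int) Int)
    (F : List (Int × List Int) × PySem.Dict (List Int) Int) : Prop where
  c1 : ∀ e ∈ stk, e ∈ F.1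
  c2 : ∀ e ∈ F.1, e ∈ stk ∨ ∃ q ∈ L, e = (s + 1, q)
  c3 : ∀ q ∈ d.keys, q ∈ F.2.keys
  c4 : ∀ q ∈ F.2.keys, q ∈ d.keys ∨ q ∈ L
  c5 : ∀ q ∈ L, q ∈ F.2.keys ∧ pvVal F.2 q ≤ s + 1
  c6 : ∀ q, pvVal F.2 q = pvVal d q ∨ (pvVal F.2 q = s + 1 ∧ (s + 1, q) ∈ F.1)
  c7 : ∀ q ∈ d.keys, pvVal F.2 q ≤ pvVal d q
  c8 : ∀ q ∈ d.keys, pvVal F.2 q = pvVal d q ∨ pvVal d q > s + 1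
  c9 : F.2.keys.Nodup
  c10 : ∀ q, q ∉ L → pvVal F.2 q = pvVal d q
  c11 : ∀ q ∈ F.2.keys, q ∉ d.keys → (pvVal F.2 q = s + 1 ∧ (s + 1, q) ∈ F.1)
  c12 : ∀ kv ∈ F.2.items, 0 ≤ kv.2
  c13 : ∀ q ∈ F.2.keys, q ∈ pvBox pos ms
  c14 : F.1.length + 5 * pvPot F.2 + 5 * (ms.toNat + 1) * (pvN pos ms - F.2.size) ≤
        stk.length + 5 * pvPot d + 5 * (ms.toNat + 1) * (pvN pos ms - d.size)

lemma pvFoldA (pos : List Int) (ms s : Int) (hs : 0 ≤ s) (hsm : s + 1 ≤ ms) :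
    ∀ (L : List (List Int)) (stk : List (Int × List Int)) (d : PySem.Dict (List Int) Int),
    d.keys.Nodup → (∀ kv ∈ d.items, 0 ≤ kv.2) → (∀ q ∈ d.keys, q ∈ pvBox pos ms) →
    (∀ q ∈ L, q ∈ pvBox pos ms) →
    PvFoldOut pos ms s L stk d (L.foldl (pvAStep s) (stk, d)) := by
  intro L
  induction L with
  | nil =>
    intro stk d hnd hnn hbox _
    simp only [List.foldl_nil]
    exact {
      c1 := fun e he => he
      c2 := fun e he => Or.inl he
      c3 := fun q hq => hq
      c4 := fun q hq => Or.inl hq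
      c5 := fun q hq => by cases hq
      c6 := fun q => Or.inl rfl
      c7 := fun q _ => le_refl _
      c8 := fun q _ => Or.inl rfl
      c9 := hnd
      c10 := fun q _ => rfl
      c11 := fun q hq hq' => absurd hq hq'
      c12 := hnn
      c13 := hbox
      c14 := le_refl _ }
  | cons c L ih =>
    intro stk d hnd hnn hbox hboxL
    rw [List.foldl_cons]
    by_cases hcond : d.contains c = false ∨ d.getD c 0 > s + 1
    · -- the neighbour is relaxed: pushed on the stack, distance recorded
      have hmid : pvAStep s (stk, d) c = ((s + 1, c) :: stk, d.insert c (s + 1)) := by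
        unfold pvAStep
        rw [if_pos hcond]
      rw [hmid]
      have hnd' : (d.insert c (s + 1)).keys.Nodup := PySem.Dict.nodup_keys_insert d c (s+1) hnd
      have hnn' : ∀ kv ∈ (d.insert c (s + 1)).items, 0 ≤ kv.2 := by
        intro kv hkv
        rcases (PySem.Dict.mem_items_insert d c (s+1) kv).mp hkv with hkc | ⟨h, -⟩
        · rw [hkc]; omega
        · exact hnn kv h
      have hbox' : ∀ q ∈ (d.insert c (s + 1)).keys, q ∈ pvBox pos ms := by
        intro q hq
        rcases (PySem.Dict.mem_keys_insert d c q (s+1)).mp hq with hqc | hq'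
        · rw [hqc]; exact hboxL c (List.mem_cons_self)
        · exact hbox q hq'
      have o := ih ((s + 1, c) :: stk) (d.insert c (s + 1)) hnd' hnn' hbox'
        (fun q hq => hboxL q (List.mem_cons_of_mem c hq))
      set F := L.foldl (pvAStep s) ((s + 1, c) :: stk, d.insert c (s + 1)) with hF
      have hvmid : pvVal (d.insert c (s + 1)) c = s + 1 := by
        rw [pvVal, PySem.Dict.getD_insert_self]
      have hvmid' : ∀ q, q ≠ c → pvVal (d.insert c (s + 1)) q = pvVal d q := by
        intro q hq
        rw [pvVal, pvVal, PySem.Dict.getD_insert_of_ne d _ _ hq]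
      have hvdc : c ∈ d.keys → d.getD c 0 > s + 1 := by
        intro hc
        rcases hcond with h | h
        · rw [(PySem.Dict.contains_iff_mem_keys d c).mpr hc] at h
          cases h
        · exact h
      refine {
        c1 := fun e he => o.c1 e (List.mem_cons_of_mem _ he)
        c2 := ?_, c3 := ?_, c4 := ?_, c5 := ?_, c6 := ?_, c7 := ?_, c8 := ?_
        c9 := o.c9, c10 := ?_, c11 := ?_, c12 := o.c12, c13 := o.c13, c14 := ?_ }
      · intro e he
        rcases o.c2 e he with h | ⟨q, hq, rfl⟩
        · rcases List.mem_cons.mp h with rfl | h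
          · exact Or.inr ⟨c, List.mem_cons_self, rfl⟩
          · exact Or.inl h
        · exact Or.inr ⟨q, List.mem_cons_of_mem c hq, rfl⟩
      · intro q hq
        exact o.c3 q ((PySem.Dict.mem_keys_insert d c q (s+1)).mpr (Or.inr hq))
      · intro q hq
        rcases o.c4 q hq with h | h
        · rcases (PySem.Dict.mem_keys_insert d c q (s+1)).mp h with rfl | h'
          · exact Or.inr List.mem_cons_self
          · exact Or.inl h'
        · exact Or.inr (List.mem_cons_of_mem c h)
      · intro q hq
        rcases List.mem_cons.mp hq with hqc | hq'
        · subst hqc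
          have hmem : q ∈ (d.insert q (s + 1)).keys :=
            (PySem.Dict.mem_keys_insert d q q (s+1)).mpr (Or.inl rfl)
          exact ⟨o.c3 q hmem, le_trans (o.c7 q hmem) (le_of_eq hvmid)⟩
        · exact o.c5 q hq'
      · intro q
        rcases o.c6 q with h | h
        · by_cases hqc : q = c
          · subst hqc
            exact Or.inr ⟨by rw [h, hvmid], o.c1 _ List.mem_cons_self⟩
          · exact Or.inl (by rw [h, hvmid' q hqc])
        · exact Or.inr h
      · intro q hq
        by_cases hqc : q = c
        · subst hqc
          have hmem : q ∈ (d.insert q (s + 1)).keys :=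
            (PySem.Dict.mem_keys_insert d q q (s+1)).mpr (Or.inl rfl)
          have h1 : pvVal F.2 q ≤ s + 1 := le_trans (o.c7 q hmem) (le_of_eq hvmid)
          have hv := hvdc hq
          have hvald : pvVal d q = d.getD q 0 := rfl
          omega
        · rw [← hvmid' q hqc]
          exact o.c7 q ((PySem.Dict.mem_keys_insert d c q (s+1)).mpr (Or.inr hq))
      · intro q hq
        by_cases hqc : q = c
        · subst hqc
          exact Or.inr (hvdc hq)
        · rcases o.c8 q ((PySem.Dict.mem_keys_insert d c q (s+1)).mpr (Or.inr hq)) with h | h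
          · exact Or.inl (by rw [h, hvmid' q hqc])
          · exact Or.inr (by rwa [hvmid' q hqc] at h)
      · intro q hq
        have hqc : q ≠ c := fun h => hq (h ▸ List.mem_cons_self)
        rw [o.c10 q (fun h => hq (List.mem_cons_of_mem c h)), hvmid' q hqc]
      · intro q hq hq'
        by_cases hqc : q = c
        · subst hqc
          refine ⟨?_, o.c1 _ List.mem_cons_self⟩
          rcases o.c6 q with h | h
          · rw [h, hvmid]
          · exact h.1
        · refine o.c11 q hq (fun h => ?_)
          rcases (PySem.Dict.mem_keys_insert d c q (s+1)).mp h with h' | h'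
          · exact hqc h'
          · exact hq' h'
      · -- measure bookkeeping
        refine le_trans o.c14 ?_
        by_cases hc : d.contains c = true
        · -- existing key relaxed: its recorded distance strictly drops
          have hpot := pvPot_insert_old (v := s + 1) hnd hc
          have hvc := hvdc ((PySem.Dict.contains_iff_mem_keys d c).mp hc)
          have hsize : (d.insert c (s + 1)).size = d.size := by
            rw [PySem.Dict.size_insert, if_pos hc]
          have hpotlt : pvPot (d.insert c (s + 1)) + 1 ≤ pvPot d := by
            rw [pvVal] at hpot
            omega
          rw [hsize]
          simp only [List.length_cons]
          omega
        · -- new key: the dict grows inside a box of size pvN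
          have hc' : d.contains c = false := by
            cases h : d.contains c
            · rfl
            · exact absurd h hc
          have hpot := pvPot_insert_new (v := s + 1) hc'
          have hsize : (d.insert c (s + 1)).size = d.size + 1 := by
            rw [PySem.Dict.size_insert, if_neg (by rw [hc']; simp)]
          have hlt : d.size < pvN pos ms :=
            pvSize_lt hnd hbox (hboxL c List.mem_cons_self)
              (fun h => hc ((PySem.Dict.contains_iff_mem_keys d c).mpr h))
          obtain ⟨k, hk⟩ : ∃ k, pvN pos ms - d.size = k + 1 :=
            ⟨pvN pos ms - d.size - 1, by omega⟩
          have hk' : pvN pos ms - (d.insert c (s + 1)).size = k := by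
            rw [hsize]; omega
          rw [hpot, hk', hk]
          have hT : 5 * (ms.toNat + 1) * (k + 1) = 5 * (ms.toNat + 1) * k + 5 * (ms.toNat + 1) := by
            ring
          rw [hT]
          have ha : (s + 1).toNat ≤ ms.toNat := by omega
          simp only [List.length_cons]
          linarith
    · -- already known with a distance ≤ steps+1: nothing changes
      have hmid : pvAStep s (stk, d) c = (stk, d) := by
        unfold pvAStep
        rw [if_neg hcond]
      rw [hmid]
      have hcont : d.contains c = true := by
        cases h : d.contains c
        · exact absurd (Or.inl h) hcond
        · rfl
      have hval : d.getD c 0 ≤ s + 1 := by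
        by_contra h
        exact hcond (Or.inr (by omega))
      have hcmem : c ∈ d.keys := (PySem.Dict.contains_iff_mem_keys d c).mp hcont
      have o := ih stk d hnd hnn hbox (fun q hq => hboxL q (List.mem_cons_of_mem c hq))
      refine {
        c1 := o.c1, c3 := o.c3, c6 := o.c6, c7 := o.c7, c8 := o.c8, c9 := o.c9
        c11 := o.c11, c12 := o.c12, c13 := o.c13, c14 := o.c14
        c2 := ?_, c4 := ?_, c5 := ?_, c10 := ?_ }
      · intro e he
        rcases o.c2 e he with h | ⟨q, hq, rfl⟩
        · exact Or.inl h
        · exact Or.inr ⟨q, List.mem_cons_of_mem c hq, rfl⟩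
      · intro q hq
        rcases o.c4 q hq with h | h
        · exact Or.inl h
        · exact Or.inr (List.mem_cons_of_mem c h)
      · intro q hq
        rcases List.mem_cons.mp hq with rfl | hq'
        · exact ⟨o.c3 q hcmem, le_trans (o.c7 q hcmem) hval⟩
        · exact o.c5 q hq'
      · intro q hq
        exact o.c10 q (fun h => hq (List.mem_cons_of_mem c h))
structure PvLoopOut (pos : List Int) (ms : Int) (d F : PySem.Dict (List Int) Int) : Prop where
  nodup : F.keys.Nodup
  zmem : pos ∈ F.keys
  zval : pvVal F pos = 0
  sound : pvDictInv pos ms F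
  closed : pvClosed ms F
  grow : ∀ q ∈ d.keys, q ∈ F.keys

lemma pvLoopA_main (pos : List Int) (ms : Int) :
    ∀ (fuel : Nat) (stk : List (Int × List Int)) (d : PySem.Dict (List Int) Int),
    pvStackInv pos ms stk → pvDictInv pos ms d → pos ∈ d.keys → pvVal d pos = 0 →
    pvSP ms stk d → d.keys.Nodup → pvMu pos ms stk d ≤ fuel →
    PvLoopOut pos ms d (pvLoopA ms fuel stk d) := by
  intro fuel
  induction fuel with
  | zero =>
    intro stk d hstk hdict hz0 hz1 hsp hnd hmu
    cases stk with
    | nil =>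
      have heq : pvLoopA ms 0 [] d = d := by rw [pvLoopA]
      rw [heq]
      exact { nodup := hnd, zmem := hz0, zval := hz1, sound := hdict,
              closed := fun q hq => (hsp q hq).resolve_left (by simp),
              grow := fun q hq => hq }
    | cons e rest =>
      exfalso
      unfold pvMu at hmu
      simp [List.length_cons] at hmu
  | succ f ih =>
    intro stk d hstk hdict hz0 hz1 hsp hnd hmu
    cases stk with
    | nil =>
      have heq : pvLoopA ms (f + 1) [] d = d := by rw [pvLoopA]
      rw [heq]
      exact { nodup := hnd, zmem := hz0, zval := hz1, sound := hdict,
              closed := fun q hq => (hsp q hq).resolve_left (by simp),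
              grow := fun q hq => hq }
    | cons e rest =>
      obtain ⟨s, p⟩ := e
      have hmu' : pvMu pos ms ((s, p) :: rest) d = pvMu pos ms rest d + 1 := by
        unfold pvMu
        simp [List.length_cons]
        ring
      obtain ⟨hs0, hsm, hbp⟩ := hstk (s, p) List.mem_cons_self
      by_cases hgt : s + 1 > ms
      · have heq : pvLoopA ms (f + 1) ((s, p) :: rest) d = pvLoopA ms f rest d := by
          rw [pvLoopA]
          simp only [if_pos hgt]
        rw [heq]
        have hsp' : pvSP ms rest d := by
          intro q hq
          rcases hsp q hq with hpend | hset
          · rcases List.mem_cons.mp hpend with hhd | htl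
            · have hq1 : q = p := congrArg Prod.snd hhd
              have hq2 : pvVal d q = s := congrArg Prod.fst hhd
              exact Or.inr (fun hle => absurd hle (by omega))
            · exact Or.inl htl
          · exact Or.inr hset
        exact ih rest d (fun e he => hstk e (List.mem_cons_of_mem _ he)) hdict hz0 hz1
          hsp' hnd (by omega)
      · have hle : s + 1 ≤ ms := by omega
        have heq : pvLoopA ms (f + 1) ((s, p) :: rest) d =
            pvLoopA ms f ((pvAdjA p).foldl (pvAStep s) (rest, d)).1
              ((pvAdjA p).foldl (pvAStep s) (rest, d)).2 := by
          rw [pvLoopA]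
          simp only [if_neg hgt]
        rw [heq]
        have hnn : ∀ kv ∈ d.items, 0 ≤ kv.2 := fun kv h => (hdict kv h).1
        have hboxd : ∀ q ∈ d.keys, q ∈ pvBox pos ms := by
          intro q hq
          obtain ⟨h1, h2, h3⟩ := hdict (q, pvVal d q) (pvVal_mem_items hnd hq)
          exact pvBall_box (by omega) h3
        have hballL : ∀ q ∈ pvAdjA p, pvBall pos ((s + 1).toNat) q := by
          intro q hq
          have : (s + 1).toNat = s.toNat + 1 := by omega
          rw [this]
          exact Or.inr ⟨p, hbp, hq⟩
        have hboxL : ∀ q ∈ pvAdjA p, q ∈ pvBox pos ms := by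
          intro q hq
          exact pvBall_box (by omega) (hballL q hq)
        have o := pvFoldA pos ms s hs0 hle (pvAdjA p) rest d hnd hnn hboxd hboxL
        set st := (pvAdjA p).foldl (pvAStep s) (rest, d) with hst
        have hstk' : pvStackInv pos ms st.1 := by
          intro e he
          rcases o.c2 e he with h | ⟨q, hq, rfl⟩
          · exact hstk e (List.mem_cons_of_mem _ h)
          · exact ⟨by omega, hle, hballL q hq⟩
        have hdict' : pvDictInv pos ms st.2 := by
          intro kv hkv
          have hkmem : kv.1 ∈ st.2.keys := PySem.Dict.mem_keys_of_mem_items st.2 hkv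
          have hval : pvVal st.2 kv.1 = kv.2 := by
            rw [pvVal, PySem.Dict.getD_of_mem_items st.2 (by simpa using hkv) o.c9]
          rcases o.c6 kv.1 with hv | ⟨hv, hstack⟩
          · by_cases hqd : kv.1 ∈ d.keys
            · obtain ⟨h1, h2, h3⟩ := hdict (kv.1, pvVal d kv.1) (pvVal_mem_items hnd hqd)
              rw [← hval, hv]
              exact ⟨h1, h2, h3⟩
            · exfalso
              obtain ⟨hv2, -⟩ := o.c11 kv.1 hkmem hqd
              have hd0 : pvVal d kv.1 = 0 := by
                rw [pvVal, PySem.Dict.getD_of_not_contains]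
                cases h : d.contains kv.1
                · rfl
                · exact absurd ((PySem.Dict.contains_iff_mem_keys d kv.1).mp h) hqd
              omega
          · rw [← hval, hv]
            refine ⟨by omega, hle, ?_⟩
            rcases o.c2 _ hstack with hrest | ⟨q, hq, hqe⟩
            · obtain ⟨-, -, hb⟩ := hstk _ (List.mem_cons_of_mem _ hrest)
              exact hb
            · have : kv.1 = q := congrArg Prod.snd hqe
              rw [this]
              exact hballL q hq
        have hz0' : pos ∈ st.2.keys := o.c3 pos hz0
        have hz1' : pvVal st.2 pos = 0 := by
          rcases o.c8 pos hz0 with h | h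
          · rw [h, hz1]
          · rw [hz1] at h
            omega
        have hsp' : pvSP ms st.1 st.2 := by
          intro q hq
          by_cases hqd : q ∈ d.keys
          · rcases o.c6 q with hv | ⟨hv, hstack⟩
            · rcases hsp q hqd with hpend | hset
              · rcases List.mem_cons.mp hpend with hhd | htl
                · -- the popped entry was q's pending entry: q = p and it is now settled
                  have hq1 : q = p := congrArg Prod.snd hhd
                  have hq2 : pvVal d q = s := congrArg Prod.fst hhd
                  refine Or.inr (fun hle' r hr => ?_)
                  subst hq1
                  obtain ⟨hrk, hrv⟩ := o.c5 r hr
                  exact ⟨hrk, by omega⟩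
                · exact Or.inl (by rw [hv]; exact o.c1 _ htl)
              · refine Or.inr (fun hle' r hr => ?_)
                rw [hv] at hle'
                obtain ⟨hrk, hrv⟩ := hset hle' r hr
                exact ⟨o.c3 r hrk, by have := o.c7 r hrk; omega⟩
            · exact Or.inl (by rw [hv]; exact hstack)
          · obtain ⟨hv, hstack⟩ := o.c11 q hq hqd
            exact Or.inl (by rw [hv]; exact hstack)
        have hmu2 : pvMu pos ms st.1 st.2 ≤ f := by
          have h14 := o.c14
          have : pvMu pos ms rest d ≤ f := by omega
          unfold pvMu at this ⊢
          omega
        have hout := ih st.1 st.2 hstk' hdict' hz0' hz1' hsp' o.c9 hmu2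
        exact { nodup := hout.nodup, zmem := hout.zmem, zval := hout.zval,
                sound := hout.sound, closed := hout.closed,
                grow := fun q hq => hout.grow q (o.c3 q hq) }
lemma pvClosed_complete {pos : List Int} {ms : Int} {F : PySem.Dict (List Int) Int}
    (hcl : pvClosed ms F) (h0 : pos ∈ F.keys) (h1 : pvVal F pos = 0) :
    ∀ k : Nat, (k : Int) ≤ ms → ∀ q, pvBall pos k q → q ∈ F.keys ∧ pvVal F q ≤ (k : Int) := by
  intro k
  induction k with
  | zero =>
    intro _ q hq
    have : q = pos := hq
    rw [this, h1]
    exact ⟨h0, le_refl _⟩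
  | succ n ih =>
    intro hk q hq
    rcases hq with hq | ⟨p, hp, hadj⟩
    · obtain ⟨hm, hv⟩ := ih (by push_cast at hk ⊢; omega) q hq
      exact ⟨hm, by push_cast at hv ⊢; omega⟩
    · obtain ⟨hm, hv⟩ := ih (by push_cast at hk ⊢; omega) p hp
      have hset := hcl p hm (by push_cast at hv hk ⊢; omega) q hadj
      exact ⟨hset.1, by push_cast at hv hk ⊢; omega⟩

lemma pvLoopA_keys (pos : List Int) (ms : Int) (hms : 1 ≤ ms) :
    (pvLoopA ms (pvFuelA pos ms) [((0 : Int), pos)] (PySem.Dict.empty.insert pos 0)).keys.Nodup ∧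
    ∀ q, q ∈ (pvLoopA ms (pvFuelA pos ms) [((0 : Int), pos)]
        (PySem.Dict.empty.insert pos 0)).keys ↔ pvBall pos ms.toNat q := by
  set d0 : PySem.Dict (List Int) Int := PySem.Dict.empty.insert pos 0 with hd0
  have hcont : (PySem.Dict.empty : PySem.Dict (List Int) Int).contains pos = false := by
    simp [PySem.Dict.contains_empty]
  have hitems : d0.items = [(pos, 0)] := by
    rw [hd0, PySem.Dict.items_insert_of_not_contains _ _ hcont]
    rfl
  have hkeys : d0.keys = [pos] := by
    rw [pvKeys_eq_map, hitems]
    simp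
  have hnd0 : d0.keys.Nodup := by rw [hkeys]; simp
  have hz1 : pvVal d0 pos = 0 := by rw [hd0, pvVal, PySem.Dict.getD_insert_self]
  have hball0 : pvBall pos 0 pos := rfl
  have hstk0 : pvStackInv pos ms [((0 : Int), pos)] := by
    intro e he
    rw [List.mem_singleton] at he
    subst he
    exact ⟨le_refl _, by omega, hball0⟩
  have hdict0 : pvDictInv pos ms d0 := by
    intro kv hkv
    rw [hitems, List.mem_singleton] at hkv
    subst hkv
    exact ⟨le_refl _, by omega, hball0⟩
  have hsp0 : pvSP ms [((0 : Int), pos)] d0 := by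
    intro q hq
    rw [hkeys, List.mem_singleton] at hq
    subst hq
    exact Or.inl (by rw [hz1]; exact List.mem_singleton.mpr rfl)
  have hsize0 : d0.size = 1 := by
    rw [← pvKeys_length, hkeys]
    rfl
  have hpot0 : pvPot d0 = 0 := by
    unfold pvPot
    rw [hitems]
    simp
  have hmu0 : pvMu pos ms [((0 : Int), pos)] d0 ≤ pvFuelA pos ms := by
    unfold pvMu pvFuelA
    rw [hsize0, hpot0]
    simp only [List.length_singleton]
    have : 5 * (ms.toNat + 1) * (pvN pos ms - 1) ≤ 5 * (ms.toNat + 1) * pvN pos ms :=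
      Nat.mul_le_mul_left _ (Nat.sub_le _ _)
    omega
  have hout := pvLoopA_main pos ms (pvFuelA pos ms) [((0 : Int), pos)] d0 hstk0 hdict0
    (by rw [hkeys]; exact List.mem_singleton.mpr rfl) hz1 hsp0 hnd0 hmu0
  refine ⟨hout.nodup, fun q => ⟨fun hq => ?_, fun hq => ?_⟩⟩
  · obtain ⟨h1, h2, h3⟩ := hout.sound (q, pvVal _ q) (pvVal_mem_items hout.nodup hq)
    exact pvBall_mono (by omega) h3
  · exact (pvClosed_complete hout.closed hout.zmem hout.zval ms.toNat
      (by omega) q hq).1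
lemma pvA_eval_neg (pos : List Int) (ms : Int) (hneg : ms < 0) :
    calc_visited_spaces_in_range pos ms = 1 := by
  unfold calc_visited_spaces_in_range
  rw [if_neg (show ¬ ((ms == 0) = true) by intro h; rw [beq_iff_eq] at h; omega)]
  set d0 : PySem.Dict (List Int) Int := PySem.Dict.empty.insert pos 0 with hd0
  obtain ⟨fl, hfl⟩ : ∃ fl, pvFuelA pos ms = fl + 1 :=
    ⟨5 * (ms.toNat + 1) * pvN pos ms, by unfold pvFuelA; omega⟩
  rw [hfl]
  have heq1 : pvLoopA ms (fl + 1) [((0 : Int), pos)] d0 = pvLoopA ms fl [] d0 := by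
    simp only [pvLoopA]
    rw [if_pos (show (0 : Int) + 1 > ms by omega)]
  have heq2 : pvLoopA ms fl [] d0 = d0 := by simp only [pvLoopA]
  rw [heq1, heq2]
  have hcont : (PySem.Dict.empty : PySem.Dict (List Int) Int).contains pos = false := by
    simp [PySem.Dict.contains_empty]
  have hitems : d0.items = [(pos, 0)] := by
    rw [hd0, PySem.Dict.items_insert_of_not_contains _ _ hcont]
    rfl
  have hsize0 : d0.size = 1 := by
    rw [← pvKeys_length, pvKeys_eq_map, hitems]
    rfl
  show ((d0.size : Int)) = 1
  rw [hsize0]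
  rfl

theorem pv_main (pos : List Int) (ms : Int) :
    calc_visited_spaces_in_range pos ms = calc_visited_spaces_in_range_alt pos ms := by
  by_cases h0 : ms = 0
  · subst h0
    rfl
  · by_cases hneg : ms < 0
    · rw [pvA_eval_neg pos ms hneg]
      unfold calc_visited_spaces_in_range_alt
      rw [if_pos (by omega)]
    · have hms : 1 ≤ ms := by omega
      unfold calc_visited_spaces_in_range
      rw [if_neg (show ¬ ((ms == 0) = true) by intro h; rw [beq_iff_eq] at h; omega)]
      unfold calc_visited_spaces_in_range_alt
      rw [if_neg (by omega)]
      obtain ⟨hndA, hA⟩ := pvLoopA_keys pos ms hms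
      have hB := pvAltB_keys pos ms
      unfold pvGx pvGy at hB
      obtain ⟨hndB, hBk⟩ := hB
      have hperm : (pvLoopA ms (pvFuelA pos ms) [((0 : Int), pos)]
          (PySem.Dict.empty.insert pos 0)).keys.Perm
          (pvLoopB ms.toNat (PySem.Set.ofList [pos])
            [(((PySem.List.pyGet? pos 0).getD 0), ((PySem.List.pyGet? pos 1).getD 0))]) := by
        rw [List.perm_ext_iff_of_nodup hndA hndB]
        intro q
        rw [hA q, hBk q]
      have hlen := hperm.length_eq
      rw [pvKeys_length] at hlen
      show ((pvLoopA ms (pvFuelA pos ms) [((0 : Int), pos)]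
          (PySem.Dict.empty.insert pos 0)).size : Int) =
        ((pvLoopB ms.toNat (PySem.Set.ofList [pos])
          [(((PySem.List.pyGet? pos 0).getD 0), ((PySem.List.pyGet? pos 1).getD 0))]).length : Int)
      exact congrArg Nat.cast hlen

-- ===== VERDICT (by name: the statement is the Claim_ definition above) =====
theorem calc_visited_spaces_in_range_spec : Claim_equal_calc_visited_spaces_in_range := by
  intro pos ms _hdom _hpre
  unfold Spec_calc_visited_spaces_in_range
  exact pv_main pos ms
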